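-- pv_equiv track=rewrite | github.com/smartdatafoundry/data_cataloguing | polars_inference_metadata.py | infer_regex_from_values
-- ===== SOURCE A (Python) =====
-- def infer_regex_from_values(values):
--     values = [str(v) for v in values if v is not None]
--     if not values:
--         return ""
--     if all(v.isdigit() for v in values):
--         return r"^\d+$"
--     if all(v.isalpha() and v.isupper() for v in values):
--         return r"^[A-Z]+$"
--     if all(v.isalnum() for v in values):
--         return r"^\w+$"
--     lengths = set(len(v) for v in values)
--     if len(lengths) == 1:
--         l = lengths.pop()
--         return rf"^.{{{l}}}$"
--     return r"^.*$"
-- ===== SOURCE B (Python) =====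
-- # B: classify each value into a 4-class semilattice (DIGIT=0, UPPER=1, ALNUM=2,
-- # OTHER=3), reduce with the lattice join, and map the joined class to a pattern;
-- # the length set is only computed when the join lands in OTHER.
-- def _klass(v):
--     if v.isdigit():
--         return 0
--     if v.isalpha() and v.isupper():
--         return 1
--     if v.isalnum():
--         return 2
--     return 3
--
-- def _join(a, b):
--     # least upper bound: equal classes stay, any mix of 0/1/2 joins to 2, 3 absorbs
--     return a if a == b else max(a, b, 2)
--
-- def infer_regex_from_values(values):
--     vs = [str(v) for v in values if v is not None]
--     if not vs:
--         return ""
--     k = _klass(vs[0])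
--     for v in vs[1:]:
--         k = _join(k, _klass(v))
--     if k == 0:
--         return r"^\d+$"
--     if k == 1:
--         return r"^[A-Z]+$"
--     if k == 2:
--         return r"^\w+$"
--     lengths = {len(v) for v in vs}
--     if len(lengths) == 1:
--         (l,) = lengths
--         return rf"^.{{{l}}}$"
--     return r"^.*$"
-- ===== Notes on version B (the rewrite author's own statement) =====
-- stated objective: alternative
-- what changed: B replaces A's staged all() scans by a map-reduce: each value is classified once into a 4-element join-semilattice (digit < w, upper-alpha < w, other = top) and the classes are folded with the lattice join; the final class indexes the pattern, with the length-set fallback computed only when the join is the top class.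
import Mathlib
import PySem

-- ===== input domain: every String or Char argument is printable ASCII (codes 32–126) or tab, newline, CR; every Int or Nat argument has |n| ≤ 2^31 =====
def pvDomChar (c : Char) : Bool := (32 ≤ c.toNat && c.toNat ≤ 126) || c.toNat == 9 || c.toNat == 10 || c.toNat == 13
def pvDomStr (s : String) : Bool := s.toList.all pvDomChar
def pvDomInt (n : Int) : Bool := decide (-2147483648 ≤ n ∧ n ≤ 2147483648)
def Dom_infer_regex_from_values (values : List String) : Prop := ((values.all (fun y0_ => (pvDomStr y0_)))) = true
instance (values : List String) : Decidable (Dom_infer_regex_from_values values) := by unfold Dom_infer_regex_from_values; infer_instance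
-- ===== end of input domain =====

-- B: map-reduce over a 4-class join-semilattice (classify each value once, fold the lattice join,
-- index the pattern by the joined class) instead of A's staged all() scans (objective: alternative, same cost).

-- ===== PORT A =====
-- v.isupper(): at least one cased char and no non-upper cased char; exact on the
-- ASCII input domain, where the cased characters are exactly the letters.
def pyStrIsupper (s : String) : Bool :=
  s.toList.any (fun c => PySem.Chars.isalpha c) &&
    s.toList.all (fun c => !PySem.Chars.isalpha c || PySem.Chars.isupper c)

-- '[str(v) for v in values if v is not None]' is the identity on List String
def infer_regex_from_values (values : List String) : String :=
  if values.isEmpty then ""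
  else if values.all (fun v => PySem.Str.strIsdigit v) then "^\\d+$"
  else if values.all (fun v => PySem.Str.strIsalpha v && pyStrIsupper v) then "^[A-Z]+$"
  else if values.all (fun v => PySem.Str.strIsalnum v) then "^\\w+$"
  else
    let lengths := PySem.Set.ofList (values.map (fun v => PySem.Str.len v))
    if PySem.Set.len lengths = 1 then
      -- lengths.pop() on a one-element set is its unique element
      "^.{" ++ PySem.Int.toStr (lengths.headD 0) ++ "}$"
    else "^.*$"

-- ===== PORT B =====
-- _klass(v): the class of a single value in the 4-element join-semilattice
def pyKlass (v : String) : Int :=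
  if PySem.Str.strIsdigit v then 0
  else if PySem.Str.strIsalpha v && pyStrIsupper v then 1
  else if PySem.Str.strIsalnum v then 2
  else 3

-- _join(a, b): the least upper bound (equal classes stay, any mix of 0/1/2 joins to 2, 3 absorbs)
def pyJoin (a b : Int) : Int := if a = b then a else max (max a b) 2

def infer_regex_from_values_alt (values : List String) : String :=
  match values with
  | [] => ""
  | v0 :: rest =>
    let k := rest.foldl (fun k v => pyJoin k (pyKlass v)) (pyKlass v0)
    if k = 0 then "^\\d+$"
    else if k = 1 then "^[A-Z]+$"
    else if k = 2 then "^\\w+$"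
    else
      let lengths := PySem.Set.ofList ((v0 :: rest).map (fun v => PySem.Str.len v))
      if PySem.Set.len lengths = 1 then
        "^.{" ++ PySem.Int.toStr (lengths.headD 0) ++ "}$"
      else "^.*$"

-- ===== PRECONDITION & SPEC =====
def Spec_infer_regex_from_values (values : List String) (out : String) : Prop := out = infer_regex_from_values_alt values
instance (values : List String) (out : String) : Decidable (Spec_infer_regex_from_values values out) := by unfold Spec_infer_regex_from_values; infer_instance

-- ===== CLAIM (what is proved, stated in full; the proofs are below) =====
def Claim_equal_infer_regex_from_values : Prop := ∀ (values : List String), Dom_infer_regex_from_values values → Spec_infer_regex_from_values values (infer_regex_from_values values)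

-- ===== LEMMAS AND PROOFS =====
-- char-level fact: a letter is not a digit (true for every Char under PySem's definitions)
lemma alpha_not_digit (c : Char) (h : PySem.Chars.isalpha c = true) :
    PySem.Chars.isdigit c = false := by
  simp only [PySem.Chars.isalpha, PySem.Chars.isupper, PySem.Chars.islower, Bool.or_eq_true,
    Bool.and_eq_true, decide_eq_true_eq, Char.le_def, UInt32.le_iff_toNat_le] at h
  simp only [PySem.Chars.isdigit, Bool.and_eq_false_iff, decide_eq_false_iff_not, not_le,
    Char.le_def, UInt32.le_iff_toNat_le]
  have e1 : 'A'.val.toNat = 65 := rfl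
  have e2 : 'Z'.val.toNat = 90 := rfl
  have e3 : 'a'.val.toNat = 97 := rfl
  have e4 : 'z'.val.toNat = 122 := rfl
  have e6 : '9'.val.toNat = 57 := rfl
  rcases h with ⟨h1, h2⟩ | ⟨h1, h2⟩ <;> right <;> omega

-- string-level consequences relating A's predicates to each other
lemma strIsalpha_not_digit (v : String) (h : PySem.Str.strIsalpha v = true) :
    PySem.Str.strIsdigit v = false := by
  simp only [PySem.Str.strIsalpha, PySem.Chars.strIsalpha, Bool.and_eq_true,
    List.all_eq_true] at h
  simp only [PySem.Str.strIsdigit, PySem.Chars.strIsdigit, Bool.and_eq_false_iff]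
  cases hv : v.toList with
  | nil => simp [hv] at h
  | cons c cs =>
    right
    rw [List.all_cons, Bool.and_eq_false_iff]
    exact Or.inl (alpha_not_digit c (h.2 c (by rw [hv]; simp)))

lemma strIsdigit_alnum (v : String) (h : PySem.Str.strIsdigit v = true) :
    PySem.Str.strIsalnum v = true := by
  simp only [PySem.Str.strIsdigit, PySem.Chars.strIsdigit, PySem.Str.strIsalnum,
    PySem.Chars.strIsalnum, Bool.and_eq_true, List.all_eq_true] at *
  exact ⟨h.1, fun c hc => by simp [PySem.Chars.isalnum, h.2 c hc]⟩

lemma strIsalpha_alnum (v : String) (h : PySem.Str.strIsalpha v = true) :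
    PySem.Str.strIsalnum v = true := by
  simp only [PySem.Str.strIsalpha, PySem.Chars.strIsalpha, PySem.Str.strIsalnum,
    PySem.Chars.strIsalnum, Bool.and_eq_true, List.all_eq_true] at *
  exact ⟨h.1, fun c hc => by simp [PySem.Chars.isalnum, h.2 c hc]⟩

-- the class of a value, characterised against A's three predicates
lemma klass_mem (v : String) : pyKlass v = 0 ∨ pyKlass v = 1 ∨ pyKlass v = 2 ∨ pyKlass v = 3 := by
  unfold pyKlass; split_ifs <;> simp

lemma klass_eq_zero (v : String) : pyKlass v = 0 ↔ PySem.Str.strIsdigit v = true := by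
  unfold pyKlass; split_ifs <;> simp_all

lemma klass_eq_one (v : String) :
    pyKlass v = 1 ↔ (PySem.Str.strIsalpha v && pyStrIsupper v) = true := by
  unfold pyKlass
  by_cases h1 : PySem.Str.strIsdigit v = true
  · have ha : PySem.Str.strIsalpha v = false := by
      cases hc : PySem.Str.strIsalpha v
      · rfl
      · rw [strIsalpha_not_digit v hc] at h1; exact absurd h1 (by simp)
    simp only [PySem.Str.strIsdigit] at h1
    simp only [PySem.Str.strIsalpha] at ha
    simp [h1, ha]
  · simp only [if_neg h1]
    split_ifs with h2 h3 <;> simp_all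

lemma klass_ne_three (v : String) : pyKlass v ≠ 3 ↔ PySem.Str.strIsalnum v = true := by
  unfold pyKlass
  split_ifs with h1 h2 h3 <;> simp_all
  · exact strIsdigit_alnum v h1
  · exact strIsalpha_alnum v (by simpa using h2.1)

-- B's fold of the lattice join, in closed form
lemma fold_join (rest : List String) (k : Int)
    (hk : k = 0 ∨ k = 1 ∨ k = 2 ∨ k = 3) :
    rest.foldl (fun k v => pyJoin k (pyKlass v)) k =
      if k = 3 ∨ ∃ v ∈ rest, pyKlass v = 3 then 3
      else if k = 0 ∧ ∀ v ∈ rest, pyKlass v = 0 then 0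
      else if k = 1 ∧ ∀ v ∈ rest, pyKlass v = 1 then 1
      else 2 := by
  induction rest generalizing k with
  | nil => rcases hk with h | h | h | h <;> simp [h]
  | cons x xs ih =>
    rw [List.foldl_cons, ih (pyJoin k (pyKlass x))
      (by rcases hk with h | h | h | h <;> rcases klass_mem x with h2 | h2 | h2 | h2 <;>
          simp [pyJoin, h, h2])]
    rcases hk with h | h | h | h <;> rcases klass_mem x with h2 | h2 | h2 | h2 <;>
      by_cases h3 : ∃ v ∈ xs, pyKlass v = 3 <;>
      by_cases hall0 : ∀ v ∈ xs, pyKlass v = 0 <;>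
      by_cases hall1 : ∀ v ∈ xs, pyKlass v = 1 <;>
      simp [pyJoin, h, h2, h3, hall0, hall1]

-- the three classification iffs in the normal form simp leaves in the goal
lemma chars_digit_iff (v : String) :
    PySem.Chars.strIsdigit v.toList = true ↔ pyKlass v = 0 := by
  simpa [PySem.Str.strIsdigit] using (klass_eq_zero v).symm

lemma chars_upper_iff (v : String) :
    (PySem.Chars.strIsalpha v.toList = true ∧ pyStrIsupper v = true) ↔ pyKlass v = 1 := by
  simpa [PySem.Str.strIsalpha, Bool.and_eq_true] using (klass_eq_one v).symm

lemma chars_alnum_iff (v : String) :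
    PySem.Chars.strIsalnum v.toList = true ↔ pyKlass v ≠ 3 := by
  rw [klass_ne_three v]
  simp [PySem.Str.strIsalnum]

-- ===== VERDICT (by name: the statement is the Claim_ definition above) =====
theorem infer_regex_from_values_spec : Claim_equal_infer_regex_from_values := by
  intro values _
  unfold Spec_infer_regex_from_values
  cases values with
  | nil => simp [infer_regex_from_values, infer_regex_from_values_alt]
  | cons v0 rest =>
    simp only [infer_regex_from_values, infer_regex_from_values_alt]
    rw [fold_join rest (pyKlass v0) (klass_mem v0)]
    by_cases c3 : pyKlass v0 = 3 ∨ ∃ v ∈ rest, pyKlass v = 3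
    · have nc0 : ¬ (pyKlass v0 = 0 ∧ ∀ v ∈ rest, pyKlass v = 0) := by
        rintro ⟨a, b⟩
        rcases c3 with hh | ⟨v, hv, hh⟩
        · omega
        · have := b v hv; omega
      have nc1 : ¬ (pyKlass v0 = 1 ∧ ∀ v ∈ rest, pyKlass v = 1) := by
        rintro ⟨a, b⟩
        rcases c3 with hh | ⟨v, hv, hh⟩
        · omega
        · have := b v hv; omega
      have ncal : ¬ (pyKlass v0 ≠ 3 ∧ ∀ v ∈ rest, pyKlass v ≠ 3) := by
        rintro ⟨a, b⟩
        rcases c3 with hh | ⟨v, hv, hh⟩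
        · exact a hh
        · exact b v hv hh
      simp [chars_digit_iff, chars_upper_iff, chars_alnum_iff,
        eq_true c3, eq_false nc0, eq_false nc1, eq_false ncal]
    · have n3a : pyKlass v0 ≠ 3 := fun h => c3 (Or.inl h)
      have n3b : ∀ v ∈ rest, pyKlass v ≠ 3 := fun v hv h => c3 (Or.inr ⟨v, hv, h⟩)
      by_cases c0 : pyKlass v0 = 0 ∧ ∀ v ∈ rest, pyKlass v = 0
      · have hne3 : ¬ ∃ v ∈ rest, pyKlass v = 3 := by
          rintro ⟨v, hv, h⟩; have := c0.2 v hv; omega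
        simp [chars_digit_iff, eq_true c0.1, eq_true c0.2, eq_false n3a, eq_false hne3]
      · by_cases c1 : pyKlass v0 = 1 ∧ ∀ v ∈ rest, pyKlass v = 1
        · have hne3 : ¬ ∃ v ∈ rest, pyKlass v = 3 := by
            rintro ⟨v, hv, h⟩; have := c1.2 v hv; omega
          have hv00 : ¬ pyKlass v0 = 0 := by have := c1.1; omega
          simp [chars_digit_iff, chars_upper_iff, eq_true c1.1, eq_true c1.2,
            eq_false n3a, eq_false hne3, eq_false hv00]
        · have hne3 : ¬ ∃ v ∈ rest, pyKlass v = 3 := by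
            rintro ⟨v, hv, h⟩; exact n3b v hv h
          simp [chars_digit_iff, chars_upper_iff, chars_alnum_iff, eq_true n3a,
            eq_true n3b, eq_false n3a, eq_false hne3, eq_false c0, eq_false c1]
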